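-- pv_equiv track=rewrite | github.com/RuleMakersLiu/admin-platform | admin-python/app/ai/toolsets.py | resolve_toolset
-- ===== SOURCE A (Python) =====
-- TOOLSETS = {
--     "analysis": {
--         "description": "Requirements analysis and planning skills",
--         "skills": ["requirement_analysis", "task_breakdown"],
--         "includes": [],
--     },
--     "development": {
--         "description": "Code generation and UI development skills",
--         "skills": ["backend_development", "frontend_development", "ui_preview"],
--         "includes": [],
--     },
--     "testing": {
--         "description": "Code review and test generation skills",
--         "skills": ["code_review", "test_generation"],
--         "includes": [],
--     },
--     "report": {
--         "description": "Progress reports and summaries",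
--         "skills": ["progress_report"],
--         "includes": [],
--     },
--     "knowledge": {
--         "description": "Knowledge base and AI upgrade skills",
--         "skills": ["knowledge_search", "ai_upgrade_check"],
--         "includes": [],
--     },
--     "full_pipeline": {
--         "description": "Complete development pipeline - all skills",
--         "skills": [],
--         "includes": ["analysis", "development", "testing", "report"],
--     },
--     "devops": {
--         "description": "Development and deployment workflow",
--         "skills": [],
--         "includes": ["development", "testing"],
--     },
-- }
--
-- def resolve_toolset(name: str, visited: set = None) -> list[str]:
--     """Recursively resolve a toolset to get all skill IDs."""
--     if visited is None:
--         visited = set()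
--     if name in {"all", "*"}:
--         all_skills = set()
--         for ts_name in TOOLSETS:
--             all_skills.update(resolve_toolset(ts_name, visited.copy()))
--         return sorted(all_skills)
--     if name in visited:
--         return []
--     visited.add(name)
--
--     toolset = TOOLSETS.get(name)
--     if not toolset:
--         return []
--
--     skills = set(toolset.get("skills", []))
--     for included in toolset.get("includes", []):
--         skills.update(resolve_toolset(included, visited))
--     return sorted(skills)
-- ===== SOURCE B (Python) =====
-- TOOLSETS = {
--     "analysis": {
--         "description": "Requirements analysis and planning skills",
--         "skills": ["requirement_analysis", "task_breakdown"],
--         "includes": [],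
--     },
--     "development": {
--         "description": "Code generation and UI development skills",
--         "skills": ["backend_development", "frontend_development", "ui_preview"],
--         "includes": [],
--     },
--     "testing": {
--         "description": "Code review and test generation skills",
--         "skills": ["code_review", "test_generation"],
--         "includes": [],
--     },
--     "report": {
--         "description": "Progress reports and summaries",
--         "skills": ["progress_report"],
--         "includes": [],
--     },
--     "knowledge": {
--         "description": "Knowledge base and AI upgrade skills",
--         "skills": ["knowledge_search", "ai_upgrade_check"],
--         "includes": [],
--     },
--     "full_pipeline": {
--         "description": "Complete development pipeline - all skills",
--         "skills": [],
--         "includes": ["analysis", "development", "testing", "report"],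
--     },
--     "devops": {
--         "description": "Development and deployment workflow",
--         "skills": [],
--         "includes": ["development", "testing"],
--     },
-- }
--
-- def resolve_toolset(name: str, visited: set = None) -> list[str]:
--     """Iteratively resolve a toolset to all skill IDs via a worklist traversal."""
--     if visited is None:
--         visited = set()
--     if name in {"all", "*"}:
--         seen = set(visited)
--         stack = list(TOOLSETS)
--     else:
--         seen = visited
--         stack = [name]
--     acc = set()
--     while stack:
--         n = stack.pop(0)
--         if n in seen:
--             continue
--         seen.add(n)
--         ts = TOOLSETS.get(n)
--         if not ts:
--             continue
--         acc.update(ts["skills"])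
--         stack.extend(ts["includes"])
--     return sorted(acc)
-- ===== Notes on version B (the rewrite author's own statement) =====
-- stated objective: alternative
-- what changed: Replaces A's recursive descent through the includes graph (with per-seed visited copies for 'all') by a single iterative worklist loop that pops nodes, accumulates their skills into one set and pushes their includes.
import Mathlib
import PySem

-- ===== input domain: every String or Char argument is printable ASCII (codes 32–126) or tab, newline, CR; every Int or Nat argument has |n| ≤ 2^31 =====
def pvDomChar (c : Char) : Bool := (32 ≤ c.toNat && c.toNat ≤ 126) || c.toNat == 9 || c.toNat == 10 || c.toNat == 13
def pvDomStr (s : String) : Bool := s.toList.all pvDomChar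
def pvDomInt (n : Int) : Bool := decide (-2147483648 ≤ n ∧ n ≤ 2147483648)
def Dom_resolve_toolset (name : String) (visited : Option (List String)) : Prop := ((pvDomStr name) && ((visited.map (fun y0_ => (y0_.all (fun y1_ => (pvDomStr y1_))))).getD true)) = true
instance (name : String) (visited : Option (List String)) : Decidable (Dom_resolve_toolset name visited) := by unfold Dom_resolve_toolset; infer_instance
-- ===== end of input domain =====

-- B replaces A's recursion by an iterative worklist traversal of the includes graph (same
-- return value; both mutate a caller-supplied `visited` the same way, equivalence proved on
-- the return value). Objective: alternative decomposition, not speed.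

-- ===== PORT A =====
-- TOOLSETS, keeping only the fields the function reads: key ↦ (skills, includes)
-- (the "description" field is never used; every toolset dict is non-empty so
-- `if not toolset` is exactly `get?` returning none, which the port's `match` mirrors).
def TOOLSETS : PySem.Dict String (List String × List String) := PySem.Dict.ofList
  [ ("analysis", (["requirement_analysis", "task_breakdown"], [])),
    ("development", (["backend_development", "frontend_development", "ui_preview"], [])),
    ("testing", (["code_review", "test_generation"], [])),
    ("report", (["progress_report"], [])),
    ("knowledge", (["knowledge_search", "ai_upgrade_check"], [])),
    ("full_pipeline", ([], ["analysis", "development", "testing", "report"])),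
    ("devops", ([], ["development", "testing"])) ]

-- the non-"all" body of A: returns (sorted skills, final visited); fuel only makes the
-- recursion total (recursion depth is bounded by the 7 keys, so fuel 16 is never exhausted)
def resolveAuxA : Nat → String → PySem.Set String → List String × PySem.Set String
  | 0, _, visited => ([], visited)
  | fuel + 1, name, visited =>
    if PySem.Set.contains visited name then ([], visited)
    else
      let visited := PySem.Set.add visited name
      match PySem.Dict.get? TOOLSETS name with
      | none => ([], visited)
      | some ts =>
        let (skills, visited) := ts.2.foldl
          (fun (p : PySem.Set String × PySem.Set String) included =>
            let r := resolveAuxA fuel included p.2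
            (PySem.Set.update p.1 r.1, r.2))
          (PySem.Set.ofList ts.1, visited)
        (PySem.List.sorted skills (fun x => x) false, visited)

def resolve_toolset (name : String) (visited : Option (List String)) : List String :=
  let v : PySem.Set String := visited.getD PySem.Set.empty
  if name = "all" ∨ name = "*" then
    let all_skills := TOOLSETS.keys.foldl
      (fun (acc : PySem.Set String) ts_name =>
        PySem.Set.update acc (resolveAuxA 16 ts_name v).1)   -- visited.copy(): each call gets v
      PySem.Set.empty
    PySem.List.sorted all_skills (fun x => x) false
  else (resolveAuxA 16 name v).1

-- ===== PORT B =====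
-- worklist loop of Source B: pop front, skip seen, union skills, push includes
-- (fuel makes the loop total; it is never exhausted: ≤ 7 productive pops, each pushing ≤ 4)
def bLoop : Nat → List String → PySem.Set String → PySem.Set String → PySem.Set String
  | 0, _, _, acc => acc
  | _ + 1, [], _, acc => acc
  | fuel + 1, n :: stack, seen, acc =>
    if PySem.Set.contains seen n then bLoop fuel stack seen acc
    else
      let seen := PySem.Set.add seen n
      match PySem.Dict.get? TOOLSETS n with
      | none => bLoop fuel stack seen acc
      | some ts => bLoop fuel (stack ++ ts.2) seen (PySem.Set.update acc ts.1)

def resolve_toolset_alt (name : String) (visited : Option (List String)) : List String :=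
  let v : PySem.Set String := visited.getD PySem.Set.empty
  let stack : List String := if name = "all" ∨ name = "*" then TOOLSETS.keys else [name]
  PySem.List.sorted (bLoop 64 stack v PySem.Set.empty) (fun x => x) false

-- ===== PRECONDITION & SPEC =====
def Spec_resolve_toolset (name : String) (visited : Option (List String)) (out : List String) : Prop := out = resolve_toolset_alt name visited
instance (name : String) (visited : Option (List String)) (out : List String) : Decidable (Spec_resolve_toolset name visited out) := by unfold Spec_resolve_toolset; infer_instance

-- ===== CLAIM (what is proved, stated in full; the proofs are below) =====
def Claim_equal_resolve_toolset : Prop := ∀ (name : String) (visited : Option (List String)), Dom_resolve_toolset name visited → Spec_resolve_toolset name visited (resolve_toolset name visited)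

-- ===== LEMMAS AND PROOFS =====
-- literal-dict lookups (rfl facts cited by the simp calls below)
theorem gA : PySem.Dict.get? TOOLSETS "analysis" = some (["requirement_analysis", "task_breakdown"], []) := rfl
theorem gD : PySem.Dict.get? TOOLSETS "development" = some (["backend_development", "frontend_development", "ui_preview"], []) := rfl
theorem gT : PySem.Dict.get? TOOLSETS "testing" = some (["code_review", "test_generation"], []) := rfl
theorem gR : PySem.Dict.get? TOOLSETS "report" = some (["progress_report"], []) := rfl
theorem gK : PySem.Dict.get? TOOLSETS "knowledge" = some (["knowledge_search", "ai_upgrade_check"], []) := rfl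
theorem gF : PySem.Dict.get? TOOLSETS "full_pipeline" = some ([], ["analysis", "development", "testing", "report"]) := rfl
theorem gV : PySem.Dict.get? TOOLSETS "devops" = some ([], ["development", "testing"]) := rfl
theorem kys : TOOLSETS.keys = ["analysis", "development", "testing", "report", "knowledge", "full_pipeline", "devops"] := rfl

theorem gNone (name : String) (h1 : name ≠ "analysis") (h2 : name ≠ "development")
    (h3 : name ≠ "testing") (h4 : name ≠ "report") (h5 : name ≠ "knowledge")
    (h6 : name ≠ "full_pipeline") (h7 : name ≠ "devops") :
    PySem.Dict.get? TOOLSETS name = none := by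
  rw [PySem.Dict.get?_eq_none_iff_not_mem_keys, kys]
  simp [h1, h2, h3, h4, h5, h6, h7]

-- one unfolding of A's recursion, fuel kept abstract so simp never over-unfolds
theorem auxVisited (f : Nat) (name : String) (v : PySem.Set String) (h : name ∈ v) :
    resolveAuxA (f+1) name v = ([], v) := by
  simp [resolveAuxA, h]

theorem auxNone (f : Nat) (name : String) (v : PySem.Set String) (h : name ∉ v)
    (hg : PySem.Dict.get? TOOLSETS name = none) :
    resolveAuxA (f+1) name v = ([], v ++ [name]) := by
  simp [resolveAuxA, h, hg]

-- the one-step equation of A's recursion (fuel abstract), used to unfold composites once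
theorem auxStep (f : Nat) (name : String) (v : PySem.Set String) :
    resolveAuxA (f+1) name v =
      if PySem.Set.contains v name then ([], v)
      else
        let v' := PySem.Set.add v name
        match PySem.Dict.get? TOOLSETS name with
        | none => ([], v')
        | some ts =>
          let r := ts.2.foldl
            (fun (p : PySem.Set String × PySem.Set String) included =>
              let r := resolveAuxA f included p.2
              (PySem.Set.update p.1 r.1, r.2))
            (PySem.Set.ofList ts.1, v')
          (PySem.List.sorted r.1 (fun x => x) false, r.2) := rfl

-- value of A's recursion on each key, as a function of which keys visited already holds
theorem aA (f : Nat) (v : List String) : resolveAuxA (f+1) "analysis" v =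
    if "analysis" ∈ v then ([], v) else (["requirement_analysis", "task_breakdown"], v ++ ["analysis"]) := by
  by_cases h : "analysis" ∈ v <;>
    simp [resolveAuxA, gA, h, PySem.Set.ofList, PySem.List.sorted, PySem.List.insertBy] <;> decide

theorem aD (f : Nat) (v : List String) : resolveAuxA (f+1) "development" v =
    if "development" ∈ v then ([], v) else (["backend_development", "frontend_development", "ui_preview"], v ++ ["development"]) := by
  by_cases h : "development" ∈ v <;>
    simp [resolveAuxA, gD, h, PySem.Set.ofList, PySem.List.sorted, PySem.List.insertBy] <;> decide

theorem aT (f : Nat) (v : List String) : resolveAuxA (f+1) "testing" v =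
    if "testing" ∈ v then ([], v) else (["code_review", "test_generation"], v ++ ["testing"]) := by
  by_cases h : "testing" ∈ v <;>
    simp [resolveAuxA, gT, h, PySem.Set.ofList, PySem.List.sorted, PySem.List.insertBy] <;> decide

theorem aR (f : Nat) (v : List String) : resolveAuxA (f+1) "report" v =
    if "report" ∈ v then ([], v) else (["progress_report"], v ++ ["report"]) := by
  by_cases h : "report" ∈ v <;>
    simp [resolveAuxA, gR, h, PySem.Set.ofList, PySem.List.sorted, PySem.List.insertBy]

theorem aK (f : Nat) (v : List String) : resolveAuxA (f+1) "knowledge" v =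
    if "knowledge" ∈ v then ([], v) else (["ai_upgrade_check", "knowledge_search"], v ++ ["knowledge"]) := by
  by_cases h : "knowledge" ∈ v <;>
    simp [resolveAuxA, gK, h, PySem.Set.ofList, PySem.List.sorted, PySem.List.insertBy] <;> decide

theorem aF (f : Nat) (v : List String) : resolveAuxA (f+2) "full_pipeline" v =
    if "full_pipeline" ∈ v then ([], v) else
      (PySem.List.sorted
        ((if "analysis" ∈ v then [] else ["requirement_analysis", "task_breakdown"]) ++
         (if "development" ∈ v then [] else ["backend_development", "frontend_development", "ui_preview"]) ++
         (if "testing" ∈ v then [] else ["code_review", "test_generation"]) ++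
         (if "report" ∈ v then [] else ["progress_report"])) (fun x => x) false,
       (((v ++ ["full_pipeline"] ++ (if "analysis" ∈ v then [] else ["analysis"])) ++
         (if "development" ∈ v then [] else ["development"])) ++
         (if "testing" ∈ v then [] else ["testing"])) ++
         (if "report" ∈ v then [] else ["report"])) := by
  rw [auxStep (f+1) "full_pipeline" v]
  by_cases h : "full_pipeline" ∈ v <;>
    by_cases h1 : "analysis" ∈ v <;> by_cases h2 : "development" ∈ v <;>
    by_cases h3 : "testing" ∈ v <;> by_cases h4 : "report" ∈ v <;>
    simp [gF, aA, aD, aT, aR, h, h1, h2, h3, h4,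
          PySem.Set.update, PySem.Set.ofList, PySem.List.sorted, PySem.List.insertBy]

theorem aV (f : Nat) (v : List String) : resolveAuxA (f+2) "devops" v =
    if "devops" ∈ v then ([], v) else
      (PySem.List.sorted
        ((if "development" ∈ v then [] else ["backend_development", "frontend_development", "ui_preview"]) ++
         (if "testing" ∈ v then [] else ["code_review", "test_generation"])) (fun x => x) false,
       ((v ++ ["devops"] ++ (if "development" ∈ v then [] else ["development"])) ++
         (if "testing" ∈ v then [] else ["testing"]))) := by
  rw [auxStep (f+1) "devops" v]
  by_cases h : "devops" ∈ v <;>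
    by_cases h2 : "development" ∈ v <;> by_cases h3 : "testing" ∈ v <;>
    simp [gV, aD, aT, h, h2, h3,
          PySem.Set.update, PySem.Set.ofList, PySem.List.sorted, PySem.List.insertBy]

set_option maxRecDepth 10000 in
set_option maxHeartbeats 4000000 in
theorem coreEq (name : String) (v : List String) :
    resolve_toolset name (some v) = resolve_toolset_alt name (some v) := by
  unfold resolve_toolset resolve_toolset_alt
  simp only [Option.getD_some]
  by_cases hall : name = "all" ∨ name = "*"
  · simp only [if_pos hall]
    by_cases h1 : "analysis" ∈ v <;> by_cases h2 : "development" ∈ v <;>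
      by_cases h3 : "testing" ∈ v <;> by_cases h4 : "report" ∈ v <;>
      by_cases h5 : "knowledge" ∈ v <;> by_cases h6 : "full_pipeline" ∈ v <;>
      by_cases h7 : "devops" ∈ v <;>
      simp [bLoop, aA, aD, aT, aR, aK, aF, aV, kys, gA, gD, gT, gR, gK, gF, gV,
            h1, h2, h3, h4, h5, h6, h7,
            PySem.Set.update,
            PySem.List.sorted, PySem.List.insertBy] <;> decide
  · simp only [if_neg hall]
    by_cases hv : name ∈ v
    · simp [bLoop, auxVisited, hv, PySem.List.sorted]
    · by_cases e1 : name = "analysis"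
      · subst e1; simp [bLoop, aA, gA, hv, PySem.Set.update, PySem.List.sorted, PySem.List.insertBy] <;> decide
      · by_cases e2 : name = "development"
        · subst e2; simp [bLoop, aD, gD, hv, PySem.Set.update, PySem.List.sorted, PySem.List.insertBy] <;> decide
        · by_cases e3 : name = "testing"
          · subst e3; simp [bLoop, aT, gT, hv, PySem.Set.update, PySem.List.sorted, PySem.List.insertBy] <;> decide
          · by_cases e4 : name = "report"
            · subst e4; simp [bLoop, aR, gR, hv, PySem.Set.update, PySem.List.sorted, PySem.List.insertBy]
            · by_cases e5 : name = "knowledge"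
              · subst e5; simp [bLoop, aK, gK, hv, PySem.Set.update, PySem.List.sorted, PySem.List.insertBy] <;> decide
              · by_cases e6 : name = "full_pipeline"
                · subst e6
                  by_cases h1 : "analysis" ∈ v <;> by_cases h2 : "development" ∈ v <;>
                    by_cases h3 : "testing" ∈ v <;> by_cases h4 : "report" ∈ v <;>
                    simp [bLoop, aF, gF, gA, gD, gT, gR, hv, h1, h2, h3, h4,
                          PySem.Set.update,
                          PySem.List.sorted, PySem.List.insertBy]
                · by_cases e7 : name = "devops"
                  · subst e7
                    by_cases h2 : "development" ∈ v <;> by_cases h3 : "testing" ∈ v <;>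
                      simp [bLoop, aV, gV, gD, gT, hv, h2, h3,
                            PySem.Set.update,
                            PySem.List.sorted, PySem.List.insertBy]
                  · have hg := gNone name e1 e2 e3 e4 e5 e6 e7
                    simp [bLoop, auxNone, hv, hg, PySem.List.sorted]

-- ===== VERDICT (by name: the statement is the Claim_ definition above) =====
theorem resolve_toolset_spec : Claim_equal_resolve_toolset := by
  intro name visited _
  unfold Spec_resolve_toolset
  cases visited with
  | none => exact coreEq name []
  | some v => exact coreEq name v
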